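-- pv_equiv track=rewrite | github.com/hack-rookie37/Programmers | Mootata/모의고사 1차/3번.py | solution
-- ===== SOURCE A (Python) =====
-- from collections import deque
--
-- def solution(order):
--     answer = 0
--     belt = deque([i for i in range(1, len(order) + 1)])
--     stack = []
--
--     for i in order:
--         while True:
--             if belt and belt[0] == i: # 메인 벨트에서 꺼낸 박스가 순서와 맞을 때
--                 belt.popleft()
--                 answer += 1
--                 break
--             else: # 메인 벨트가 비어있거나, 박스가 순서와 다를 때
--                 if stack and stack[-1] == i: # 보조 벨트의 박스가 순서와 맞을 때
--                     stack.pop()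
--                     answer += 1
--                     break
--                 elif belt: # 보조 벨트의 박스가 순서와 다르지만 메인 벨트가 비어있지는 않을 때
--                     stack.append(belt.popleft())
--                 else: # 메인 벨트가 비어있고, 보조 벨트의 박스도 순서와 다를 때
--                     return answer
--     return answer
-- ===== SOURCE B (Python) =====
-- def solution(order):
--     # No auxiliary-stack simulation: since boxes arrive in increasing order, the
--     # side stack is always increasing, so its top is simply the maximum of the
--     # set of boxes skipped so far. Track a cursor and that set of skipped boxes.
--     n = len(order)
--     nxt = 1
--     skipped = set()
--     for pos, i in enumerate(order):
--         if nxt <= i <= n: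
--             skipped.update(range(nxt, i))
--             nxt = i + 1
--         elif skipped and i == max(skipped):
--             skipped.discard(i)
--         else:
--             return pos
--     return n
-- ===== Notes on version B (the rewrite author's own statement) =====
-- stated objective: alternative
-- what changed: B does not simulate the belt/stack process at all: using the invariant that the auxiliary stack is always increasing (boxes are pushed in increasing order), it keeps only a cursor and an unordered set of skipped box numbers, accepting a box iff it lies between the cursor and n or equals the maximum of the skipped set, and returns the loop index at the first failure instead of counting successes.
import Mathlib
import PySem

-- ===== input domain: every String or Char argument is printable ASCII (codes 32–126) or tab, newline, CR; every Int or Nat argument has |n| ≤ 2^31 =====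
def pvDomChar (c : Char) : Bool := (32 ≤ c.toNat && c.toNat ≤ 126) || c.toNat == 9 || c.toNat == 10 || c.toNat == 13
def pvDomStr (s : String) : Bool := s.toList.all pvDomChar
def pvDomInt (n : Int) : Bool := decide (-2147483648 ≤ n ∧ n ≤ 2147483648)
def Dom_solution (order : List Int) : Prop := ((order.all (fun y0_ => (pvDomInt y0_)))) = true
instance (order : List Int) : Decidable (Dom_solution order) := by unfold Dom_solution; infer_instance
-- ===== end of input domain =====

-- B drops the belt/stack simulation entirely: the auxiliary stack is always increasing,
-- so B keeps only a cursor and the SET of skipped box numbers, testing a box against the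
-- cursor or the set's maximum (objective: alternative).

-- ===== PORT A =====
-- A's inner `while True` loop: recursion on the belt (it shrinks on every non-break
-- iteration). The Python stack grows/pops at the END; here it is stored top-first
-- (Lean head = Python stack[-1]), which is the same data accessed the same way.
-- Result: Sum.inl (belt, stack, answer) after a `break`, Sum.inr answer for `return answer`.
def loopA (i : Int) : List Int → List Int → Int → ((List Int × List Int × Int) ⊕ Int)
  | [], stack, ans =>
    match stack with
    | t :: ts => if t = i then Sum.inl ([], ts, ans + 1) else Sum.inr ans
    | [] => Sum.inr ans
  | b :: bs, stack, ans =>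
    if b = i then Sum.inl (bs, stack, ans + 1)
    else
      match stack with
      | t :: ts => if t = i then Sum.inl (b :: bs, ts, ans + 1) else loopA i bs (b :: t :: ts) ans
      | [] => loopA i bs [b] ans

-- the `for i in order` loop
def runA : List Int → List Int → List Int → Int → Int
  | [], _, _, ans => ans
  | i :: rest, belt, stack, ans =>
    match loopA i belt stack ans with
    | Sum.inl (b, s, a) => runA rest b s a
    | Sum.inr a => a

def solution (order : List Int) : Int :=
  runA order ((List.range order.length).map (fun k => Int.ofNat k + 1)) [] 0

-- ===== PORT B =====
-- B's `for pos, i in enumerate(order)` loop over (position, box) pairs; state: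
-- cursor `nxt` and the Python set `skipped` (PySem.Set, distinct elements in
-- first-insertion order; max(skipped) is order-independent on distinct ints).
def stepsB : List (Int × Int) → Int → Int → PySem.Set Int → Int
  | [], n, _, _ => n
  | (pos, i) :: rest, n, nxt, skipped =>
    if nxt ≤ i ∧ i ≤ n then
      stepsB rest n (i + 1) (skipped.update (PySem.List.pyRange nxt i 1))
    else if skipped ≠ [] ∧ PySem.List.max? skipped (fun x => x) = some i then
      stepsB rest n nxt (skipped.discard i)
    else pos

def solution_alt (order : List Int) : Int :=
  stepsB (PySem.List.enumerate order 0) (order.length : Int) 1 PySem.Set.empty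

-- ===== PRECONDITION & SPEC =====
def Spec_solution (order : List Int) (out : Int) : Prop := out = solution_alt order
instance (order : List Int) (out : Int) : Decidable (Spec_solution order out) := by unfold Spec_solution; infer_instance

-- ===== CLAIM (what is proved, stated in full; the proofs are below) =====
def Claim_equal_solution : Prop := ∀ (order : List Int), Dom_solution order → Spec_solution order (solution order)

-- ===== LEMMAS AND PROOFS =====

-- the belt `[nxt, nxt+1, …]` of length m
def beltL (m : Nat) (nxt : Int) : List Int := (List.range m).map (fun k => nxt + Int.ofNat k)

lemma beltL_succ (m : Nat) (nxt : Int) : beltL (m + 1) nxt = nxt :: beltL m (nxt + 1) := by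
  unfold beltL
  rw [List.range_succ_eq_map, List.map_cons, List.map_map]
  refine congrArg₂ _ (by simp) ?_
  exact List.map_congr_left (fun k _ => by simp [Function.comp]; ring)

-- the maximum of a list whose last element strictly dominates the rest
lemma max?_append_top (l : List Int) (t : Int) (h : ∀ x ∈ l, x < t) :
    PySem.List.max? (l ++ [t]) (fun x => x) = some t := by
  obtain ⟨m, hm⟩ : ∃ m, PySem.List.max? (l ++ [t]) (fun x => x) = some m := by
    cases hmx : PySem.List.max? (l ++ [t]) (fun x => x) with
    | none => exact absurd ((PySem.List.max?_eq_none_iff _ _).mp hmx) (by simp)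
    | some m => exact ⟨m, rfl⟩
  have hmem := PySem.List.max?_mem hm
  have hmax := PySem.List.max?_isMax hm t (by simp)
  rcases List.mem_append.1 hmem with hl | hl
  · exact absurd hmax (by have := h m hl; omega)
  · simp only [List.mem_singleton] at hl; rw [hm, hl]

-- discarding the dominating last element of a duplicate-free list
lemma discard_append_top (l : List Int) (t : Int) (h : t ∉ l) :
    PySem.Set.discard (l ++ [t]) t = l := by
  show List.filter (fun y => !(y == t)) (l ++ [t]) = l
  rw [List.filter_append]
  have h1 : List.filter (fun y => !(y == t)) [t] = [] := by simp
  have h2 : List.filter (fun y => !(y == t)) l = l :=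
    List.filter_eq_self.2 (fun x hx => by
      have hxt : x ≠ t := fun hxt => h (hxt ▸ hx)
      simp [hxt])
  rw [h1, h2, List.append_nil]

-- A's inner loop on the belt [nxt,…,n] computes what B's per-box case split computes
lemma keyB (i n : Int) : ∀ (m : Nat) (nxt : Int) (stack : List Int) (ans : Int),
    nxt + m = n + 1 → (∀ x ∈ stack, x < nxt) →
    loopA i (beltL m nxt) stack ans =
      if nxt ≤ i ∧ i ≤ n then
        Sum.inl (beltL (n - i).toNat (i + 1), (PySem.List.pyRange nxt i 1).reverse ++ stack, ans + 1)
      else if stack.head? = some i then Sum.inl (beltL m nxt, stack.tail, ans + 1)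
      else Sum.inr ans := by
  intro m
  induction m with
  | zero =>
    intro nxt stack ans hm hs
    have hc1 : ¬ (nxt ≤ i ∧ i ≤ n) := by intro ⟨h1, h2⟩; omega
    rw [if_neg hc1]
    have hb0 : beltL 0 nxt = [] := rfl
    rw [hb0]
    cases stack with
    | nil => simp [loopA]
    | cons t ts =>
      by_cases ht : t = i
      · simp [loopA, ht]
      · simp [loopA, ht]
  | succ m ih =>
    intro nxt stack ans hm hs
    rw [beltL_succ]
    by_cases hb : nxt = i
    · have hc1 : nxt ≤ i ∧ i ≤ n := by omega
      rw [if_pos hc1]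
      have hr : PySem.List.pyRange nxt i 1 = [] := PySem.List.pyRange_one_eq_nil (by omega)
      have hnat : (n - i).toNat = m := by omega
      simp [loopA, hb, hnat]
    · cases stack with
      | nil =>
        simp only [loopA, if_neg hb]
        rw [ih (nxt + 1) [nxt] ans (by omega) (by intro x hx; simp at hx; omega)]
        by_cases hc : nxt + 1 ≤ i ∧ i ≤ n
        · have hc' : nxt ≤ i ∧ i ≤ n := ⟨by omega, hc.2⟩
          rw [if_pos hc, if_pos hc']
          rw [PySem.List.pyRange_one_cons (show nxt < i by omega)]
          simp
        · have hc' : ¬ (nxt ≤ i ∧ i ≤ n) := by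
            intro h'; obtain ⟨ha, hbn⟩ := h'; exact hc ⟨by omega, hbn⟩
          rw [if_neg hc, if_neg hc']
          simp only [List.head?_cons, List.head?_nil]
          rw [if_neg (by simp [hb]), if_neg (by simp)]
      | cons t ts =>
        by_cases ht : t = i
        · have hc1 : ¬ (nxt ≤ i ∧ i ≤ n) := by
            have := hs t (List.mem_cons_self ..); intro ⟨h1, _⟩; omega
          rw [if_neg hc1]
          simp [loopA, hb, ht]
        · simp only [loopA, if_neg hb, if_neg ht]
          rw [ih (nxt + 1) (nxt :: t :: ts) ans (by omega)
                (by intro x hx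
                    rcases List.mem_cons.1 hx with rfl | hx
                    · omega
                    · exact lt_trans (hs x hx) (by omega))]
          by_cases hc : nxt + 1 ≤ i ∧ i ≤ n
          · have hc' : nxt ≤ i ∧ i ≤ n := ⟨by omega, hc.2⟩
            rw [if_pos hc, if_pos hc']
            rw [PySem.List.pyRange_one_cons (show nxt < i by omega)]
            simp
          · have hc' : ¬ (nxt ≤ i ∧ i ≤ n) := by
              intro h'; obtain ⟨ha, hbn⟩ := h'; exact hc ⟨by omega, hbn⟩
            rw [if_neg hc, if_neg hc']
            simp only [List.head?_cons]
            rw [if_neg (by simp [hb]), if_neg (by simp [ht])]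

-- the two outer loops, related by: A's stack (top-first) = reverse of B's skipped set
lemma run_eq (n : Int) : ∀ (rest : List Int) (nxt : Int) (stack : List Int) (ans : Int) (m : Nat),
    nxt + m = n + 1 → (∀ x ∈ stack, x < nxt) → stack.Pairwise (fun a b => b < a) →
    ans + rest.length = n →
    runA rest (beltL m nxt) stack ans = stepsB (PySem.List.enumerate rest ans) n nxt stack.reverse := by
  intro rest
  induction rest with
  | nil =>
    intro nxt stack ans m _ _ _ hlen
    simp only [PySem.List.enumerate_nil, runA, stepsB]
    simp at hlen; omega
  | cons i rest ih =>
    intro nxt stack ans m hm hs hp hlen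
    rw [PySem.List.enumerate_cons]
    simp only [runA, stepsB, keyB i n m nxt stack ans hm hs]
    by_cases hc1 : nxt ≤ i ∧ i ≤ n
    · rw [if_pos hc1, if_pos hc1]
      have hdisj : ∀ x ∈ PySem.List.pyRange nxt i 1, x ∉ (stack.reverse : List Int) := by
        intro x hx hmem
        have hge := (PySem.List.mem_pyRange_one.1 hx).1
        have := hs x (List.mem_reverse.1 hmem); omega
      have hupd : PySem.Set.update stack.reverse (PySem.List.pyRange nxt i 1)
          = ((PySem.List.pyRange nxt i 1).reverse ++ stack).reverse := by
        rw [PySem.Set.update_eq_append_of_disjoint _ _ (PySem.List.nodup_pyRange_one nxt i) hdisj]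
        simp
      rw [hupd]
      exact ih (i + 1) ((PySem.List.pyRange nxt i 1).reverse ++ stack) (ans + 1)
        (n - i).toNat (by omega)
        (by intro x hx
            rcases List.mem_append.1 hx with hx | hx
            · have := (PySem.List.mem_pyRange_one.1 (List.mem_reverse.1 hx)); omega
            · have := hs x hx; omega)
        (by refine List.pairwise_append.2 ⟨?_, hp, ?_⟩
            · rw [List.pairwise_reverse]
              exact PySem.List.pairwise_lt_pyRange_one nxt i
            · intro x hx y hy
              have := (PySem.List.mem_pyRange_one.1 (List.mem_reverse.1 hx)).1
              have := hs y hy; omega)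
        (by simp at hlen ⊢; omega)
    · rw [if_neg hc1, if_neg hc1]
      cases stack with
      | nil =>
        simp
      | cons t ts =>
        have hts : ∀ x ∈ ts, x < t := by
          have := (List.pairwise_cons.1 hp).1; exact this
        have hmax : PySem.List.max? ((t :: ts).reverse) (fun x => x) = some t := by
          rw [List.reverse_cons]
          exact max?_append_top ts.reverse t (fun x hx => hts x (List.mem_reverse.1 hx))
        by_cases ht : t = i
        · rw [if_pos (by simp [ht]),
              if_pos ⟨by simp, by rw [hmax, ht]⟩]
          have hdisc : PySem.Set.discard ((t :: ts).reverse) i = ts.reverse := by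
            rw [List.reverse_cons, ← ht]
            exact discard_append_top ts.reverse t
              (fun hmem => by have := hts t (List.mem_reverse.1 hmem); omega)
          rw [hdisc]
          simp only [List.tail_cons]
          exact ih nxt ts (ans + 1) m hm
            (fun x hx => hs x (List.mem_cons_of_mem _ hx))
            ((List.pairwise_cons.1 hp).2)
            (by simp at hlen ⊢; omega)
        · rw [if_neg (by simp [ht]),
              if_neg (by intro ⟨_, hmx⟩; rw [hmax] at hmx; exact ht (Option.some.inj hmx))]

-- ===== VERDICT (by name: the statement is the Claim_ definition above) =====
theorem solution_spec : Claim_equal_solution := by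
  intro order _
  unfold Spec_solution solution solution_alt
  have hbelt : (List.range order.length).map (fun k => Int.ofNat k + 1) = beltL order.length 1 := by
    unfold beltL; exact List.map_congr_left (fun k _ => by ring)
  rw [hbelt]
  exact run_eq (order.length : Int) order 1 [] 0 order.length (by omega) (by simp)
    (by simp) (by simp)
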